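-- pv_equiv track=rewrite | github.com/Mashakal/Minerva | Minerva/Information/InfoManager.py | remove_subpaths
-- ===== SOURCE A (Python) =====
-- def remove_subpaths(paths):
--     """Removes any path within paths that is a subpath of any other path."""
--     # Algorithm is much simpler when the list of paths is sorted.
--     if not paths:
--         return []
--     paths.sort()
--     # Find all subpaths, i.e. where paths[i] is a sublist of paths[i + 1].
--     subpaths = [paths[i] for i in range(len(paths) - 1) \
--                 if paths[i] == paths[i + 1][:len(paths[i])]]
--     for path in subpaths:
--         paths.remove(path)
--     return paths
-- ===== SOURCE B (Python) =====
-- def remove_subpaths(paths):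
--     """Removes any path within paths that is a subpath of any other path."""
--     if not paths:
--         return []
--     paths.sort()
--     # Single pass: keep each path unless it is a prefix of its successor; the last always stays.
--     return [p for p, q in zip(paths, paths[1:]) if q[:len(p)] != p] + [paths[-1]]
-- ===== Notes on version B (the rewrite author's own statement) =====
-- stated objective: alternative
-- what changed: Instead of building a list of prefix-subpaths and then repeatedly calling list.remove (each a linear scan), B does one zip pass over the sorted list keeping each path that is not a prefix of its successor (the last path always stays); worst case drops from quadratic to the sort's cost, though on typical inputs with few prefix pairs both are sort-dominated.
import Mathlib
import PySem

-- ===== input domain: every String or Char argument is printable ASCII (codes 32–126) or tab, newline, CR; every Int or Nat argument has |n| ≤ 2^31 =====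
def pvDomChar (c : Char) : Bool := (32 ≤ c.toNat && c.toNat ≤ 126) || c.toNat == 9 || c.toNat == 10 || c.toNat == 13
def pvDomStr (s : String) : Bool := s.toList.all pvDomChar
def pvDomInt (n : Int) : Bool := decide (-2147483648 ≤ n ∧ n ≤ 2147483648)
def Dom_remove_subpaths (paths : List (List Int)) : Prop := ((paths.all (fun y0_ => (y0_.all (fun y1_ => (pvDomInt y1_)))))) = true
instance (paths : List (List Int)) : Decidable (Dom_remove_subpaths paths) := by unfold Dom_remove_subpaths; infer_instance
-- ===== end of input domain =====

-- B replaces A's "collect prefix-subpaths, then repeated list.remove" with a single zip pass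
-- over the sorted list keeping non-prefix-of-successor paths (alternative algorithm, same measured cost).
-- Both Pythons sort `paths` in place (and A additionally removes from it); the equivalence proved
-- here is about the RETURN value only.

-- ===== PORT A =====
-- list.remove here never hits the not-found (ValueError) branch: every collected subpath is
-- still present in the remaining list, so the `.getD acc` fallback is unreachable.
def remove_subpaths (paths : List (List Int)) : List (List Int) :=
  if paths = [] then []
  else
    let s := PySem.List.sorted paths (fun x => x) false
    let subpaths : List (List Int) :=
      ((PySem.List.pyRange 0 (PySem.List.len s - 1) 1).filter
        (fun i => PySem.List.pyGetD s i [] ==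
          PySem.List.slice (PySem.List.pyGetD s (i + 1) []) none
            (some (PySem.List.len (PySem.List.pyGetD s i []))))).map
        (fun i => PySem.List.pyGetD s i [])
    subpaths.foldl (fun acc p => (PySem.List.remove? acc p).getD acc) s

-- ===== PORT B =====
def remove_subpaths_alt (paths : List (List Int)) : List (List Int) :=
  if paths = [] then []
  else
    let s := PySem.List.sorted paths (fun x => x) false
    ((s.zip s.tail).filter
        (fun pq => !(PySem.List.slice pq.2 none (some (PySem.List.len pq.1)) == pq.1))).map (·.1)
      ++ [PySem.List.pyGetD s (-1) []]

-- ===== PRECONDITION & SPEC =====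
def Spec_remove_subpaths (paths : List (List Int)) (out : List (List Int)) : Prop := out = remove_subpaths_alt paths
instance (paths : List (List Int)) (out : List (List Int)) : Decidable (Spec_remove_subpaths paths out) := by unfold Spec_remove_subpaths; infer_instance

-- ===== CLAIM (what is proved, stated in full; the proofs are below) =====
def Claim_equal_remove_subpaths : Prop := ∀ (paths : List (List Int)), Dom_remove_subpaths paths → Spec_remove_subpaths paths (remove_subpaths paths)

-- ===== LEMMAS AND PROOFS =====

-- A's comparison `s[i] == s[i+1][:len(s[i])]` as a predicate on the adjacent pair.
def pvIsPref (pq : List Int × List Int) : Bool :=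
  pq.1 == PySem.List.slice pq.2 none (some (PySem.List.len pq.1))

theorem pvIsPref_self (x : List Int) : pvIsPref (x, x) = true := by
  simp [pvIsPref, PySem.List.slice_to, PySem.List.len]

-- the range/index comprehension of A equals the zip of adjacent pairs
theorem pv_map_pair_pyRange (s : List (List Int)) :
    (PySem.List.pyRange 0 (PySem.List.len s - 1) 1).map
      (fun i => (PySem.List.pyGetD s i [], PySem.List.pyGetD s (i + 1) [])) = s.zip s.tail := by
  apply List.ext_getElem
  · simp [PySem.List.len_eq, PySem.List.length_pyRange_one, List.length_zip]
  · intro k h1 h2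
    have hk : k < s.length - 1 := by
      simpa [PySem.List.len_eq, PySem.List.length_pyRange_one] using h1
    have hks : k < s.length := by omega
    have hks1 : k + 1 < s.length := by omega
    have hrg : (PySem.List.pyRange 0 (PySem.List.len s - 1) 1)[k]'(by
        simpa [PySem.List.len_eq, PySem.List.length_pyRange_one] using h1) = (k : Int) := by
      rw [PySem.List.getElem_pyRange_one]; ring
    simp only [List.getElem_map, hrg]
    have hg1 : PySem.List.pyGetD s (k : Int) [] = s[k] := by
      rw [PySem.List.pyGetD_eq_getElem] <;> simp <;> omega
    have hg2 : PySem.List.pyGetD s ((k : Int) + 1) [] = s[k + 1] := by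
      have : ((k : Int) + 1) = ((k + 1 : Nat) : Int) := by push_cast; ring
      rw [this, PySem.List.pyGetD_eq_getElem] <;> simp <;> try omega
    rw [hg1, hg2]
    have htail : s.tail[k]'(by simp [List.length_tail]; omega) = s[k + 1] := by
      simp [List.getElem_tail]
    simp [List.getElem_zip, htail]

-- A's subpaths list in zip form
theorem pv_subpaths_eq_zip (s : List (List Int)) :
    ((PySem.List.pyRange 0 (PySem.List.len s - 1) 1).filter
        (fun i => PySem.List.pyGetD s i [] ==
          PySem.List.slice (PySem.List.pyGetD s (i + 1) []) none
            (some (PySem.List.len (PySem.List.pyGetD s i []))))).map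
        (fun i => PySem.List.pyGetD s i []) =
    ((s.zip s.tail).filter pvIsPref).map (·.1) := by
  have h := pv_map_pair_pyRange s
  calc ((PySem.List.pyRange 0 (PySem.List.len s - 1) 1).filter
        (fun i => pvIsPref (PySem.List.pyGetD s i [], PySem.List.pyGetD s (i + 1) []))).map
        (fun i => (PySem.List.pyGetD s i [], PySem.List.pyGetD s (i + 1) []).1)
      = (((PySem.List.pyRange 0 (PySem.List.len s - 1) 1).map
          (fun i => (PySem.List.pyGetD s i [], PySem.List.pyGetD s (i + 1) []))).filter pvIsPref).map (·.1) := by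
        rw [List.filter_map, List.map_map]; rfl
    _ = ((s.zip s.tail).filter pvIsPref).map (·.1) := by rw [h]

-- removing a value distinct from the head leaves the head in place
theorem pv_foldl_remove_cons (x : List Int) (l : List (List Int)) (vs : List (List Int))
    (hne : ∀ v ∈ vs, v ≠ x) :
    vs.foldl (fun acc p => (PySem.List.remove? acc p).getD acc) (x :: l) =
      x :: vs.foldl (fun acc p => (PySem.List.remove? acc p).getD acc) l := by
  induction vs generalizing l with
  | nil => rfl
  | cons v vs ih =>
    have hvx : x ≠ v := fun h => (hne v (by simp)) h.symm
    have hrw : (PySem.List.remove? (x :: l) v).getD (x :: l) =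
        x :: (PySem.List.remove? l v).getD l := by
      rw [PySem.List.remove?_cons_of_ne l hvx]
      cases PySem.List.remove? l v <;> simp
    simp only [List.foldl_cons, hrw]
    exact ih _ (fun w hw => hne w (by simp [hw]))

-- the main induction: on a nondecreasing nonempty list, A's removals produce B's filtered list
-- both LT/DecidableLT instance pairs on List Int order lists the same way, so sorted agrees
theorem pv_sorted_bridge (paths : List (List Int)) :
    PySem.List.sorted paths (fun x => x) false =
      @PySem.List.sorted (List Int) (List Int) List.instLinearOrder.toLT
        LinearOrder.toDecidableLT paths (fun x => x) false := by
  rw [@PySem.List.sorted_eq_foldl_insertBy (List Int) (List Int) List.instLT _ paths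
        (fun x => x),
      @PySem.List.sorted_eq_foldl_insertBy (List Int) (List Int) List.instLinearOrder.toLT
        LinearOrder.toDecidableLT paths (fun x => x)]
  congr 1
  funext acc x
  congr 1
  funext a b
  exact decide_eq_decide.mpr Iff.rfl

theorem pv_main (s : List (List Int)) (hs : s ≠ []) (hp : s.Pairwise (· ≤ ·)) :
    (((s.zip s.tail).filter pvIsPref).map (·.1)).foldl
        (fun acc p => (PySem.List.remove? acc p).getD acc) s =
      ((s.zip s.tail).filter (fun pq => !pvIsPref pq)).map (·.1) ++ [s.getLast hs] := by
  induction s with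
  | nil => exact absurd rfl hs
  | cons x t ih =>
    cases t with
    | nil => simp
    | cons y t =>
      have hxy : x ≤ y := (List.pairwise_cons.mp hp).1 y (by simp)
      have hp' : (y :: t).Pairwise (· ≤ ·) := (List.pairwise_cons.mp hp).2
      have hne' : (y :: t) ≠ ([] : List (List Int)) := by simp
      by_cases hP : pvIsPref (x, y) = true
      · -- x is a prefix of y: A removes the head occurrence, B filters the pair out
        have ih' := ih hne' hp'
        simp only [List.tail_cons] at ih'
        simp only [List.tail_cons, List.zip_cons_cons, List.filter_cons, hP, Bool.not_true,
          if_true, List.map_cons, List.foldl_cons, PySem.List.remove?_cons_self,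
          Option.getD_some]
        simp only [Bool.false_eq_true, if_false]
        rw [ih']
        simp [List.getLast_cons]
      · -- x is not a prefix of y: x survives, and no later removal can hit x
        have hPf : pvIsPref (x, y) = false := by simpa using hP
        have hne : ∀ v ∈ (((y :: t).zip t).filter pvIsPref).map (fun pq : List Int × List Int => pq.1),
            v ≠ x := by
          intro v hv hveq
          obtain ⟨pq, hpq, hfst⟩ := List.mem_map.mp hv
          have hmem : pq ∈ (y :: t).zip t := (List.mem_filter.mp hpq).1
          have hvmem : pq.1 ∈ y :: t := by
            obtain ⟨a, b⟩ := pq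
            exact (List.of_mem_zip hmem).1
          have hyall : ∀ w ∈ y :: t, y ≤ w := by
            intro w hw
            rcases List.mem_cons.mp hw with rfl | hw
            · exact le_refl w
            · exact (List.pairwise_cons.mp hp').1 w hw
          have hpx : pq.1 = x := hfst.trans hveq
          have hyx : y = x := le_antisymm (hpx ▸ hyall _ hvmem) hxy
          rw [hyx] at hPf
          simp [pvIsPref_self x] at hPf
        have ih' := ih hne' hp'
        simp only [List.tail_cons] at ih'
        simp only [List.tail_cons, List.zip_cons_cons, List.filter_cons, hPf, Bool.not_false,
          if_true, List.map_cons]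
        simp only [Bool.false_eq_true, if_false]
        rw [pv_foldl_remove_cons x (y :: t) _ hne, ih']
        simp [List.getLast_cons]

-- ===== VERDICT (by name: the statement is the Claim_ definition above) =====
theorem remove_subpaths_spec : Claim_equal_remove_subpaths := by
  intro paths _
  unfold Spec_remove_subpaths remove_subpaths remove_subpaths_alt
  by_cases h : paths = []
  · simp [h]
  · simp only [if_neg h]
    set s := PySem.List.sorted paths (fun x => x) false with hsdef
    have hs : s ≠ [] := by
      rw [hsdef, Ne, PySem.List.sorted_eq_nil_iff]; exact h
    have hp : s.Pairwise (· ≤ ·) := by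
      rw [hsdef, pv_sorted_bridge]
      exact PySem.List.sorted_pairwise paths (fun x => x)
    rw [pv_subpaths_eq_zip, pv_main s hs hp, PySem.List.pyGetD_neg_one s [] hs]
    congr 1
    congr 1
    apply List.filter_congr
    intro pq _
    simp [pvIsPref, eq_comm]
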